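-- pv_equiv track=rewrite | github.com/nadavo/CodingInterviews | strings/replace_characters_in_string.py | calc_num_garbage
-- ===== SOURCE A (Python) =====
-- from typing import List, Tuple
--
-- def calc_num_garbage(A: List[str]) -> int:
--     num_garbage = 0
--     for i in A:
--         if i == "a":
--             num_garbage += 1
--         elif i == "b":
--             num_garbage -= 1
--     return num_garbage
-- ===== SOURCE B (Python) =====
-- from typing import List, Tuple
--
-- _SCORE = {"a": 1, "b": -1}
--
-- def calc_num_garbage(A: List[str]) -> int:
--     n = len(A)
--     if n == 0:
--         return 0
--     if n == 1:
--         return _SCORE.get(A[0], 0)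
--     mid = n // 2
--     return calc_num_garbage(A[:mid]) + calc_num_garbage(A[mid:])
-- ===== Notes on version B (the rewrite author's own statement) =====
-- stated objective: alternative
-- what changed: Replaces the single-pass signed-accumulator loop with a divide-and-conquer recursion: split the list at the midpoint, score each half recursively via a lookup table, and add the two subtotals.
import Mathlib
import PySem

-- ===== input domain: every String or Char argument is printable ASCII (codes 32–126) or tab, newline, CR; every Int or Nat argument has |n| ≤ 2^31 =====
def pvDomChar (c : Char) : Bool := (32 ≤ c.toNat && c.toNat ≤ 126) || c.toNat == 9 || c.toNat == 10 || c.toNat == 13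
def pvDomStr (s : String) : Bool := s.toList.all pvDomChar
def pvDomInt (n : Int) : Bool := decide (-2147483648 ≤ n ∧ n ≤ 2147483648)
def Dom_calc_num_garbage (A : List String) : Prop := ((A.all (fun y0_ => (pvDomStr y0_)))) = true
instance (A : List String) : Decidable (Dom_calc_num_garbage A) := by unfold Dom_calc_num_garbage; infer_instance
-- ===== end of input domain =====

-- B replaces the single-pass signed accumulator with divide-and-conquer: split at the midpoint,
-- score each half recursively via a lookup table, add the subtotals (alternative decomposition).

-- ===== PORT A =====
def calc_num_garbage (A : List String) : Int :=
  A.foldl (fun num_garbage i =>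
    if i == "a" then num_garbage + 1
    else if i == "b" then num_garbage - 1
    else num_garbage) 0

-- ===== PORT B =====
def pvScore : PySem.Dict String Int := PySem.Dict.ofList [("a", 1), ("b", -1)]

def calc_num_garbage_alt (A : List String) : Int :=
  match A with
  | [] => 0
  | [x] => pvScore.getD x 0
  | x :: y :: rest =>
    -- mid = n // 2 with n ≥ 0: Python slices A[:mid] / A[mid:] = take mid / drop mid
    let mid := (x :: y :: rest).length / 2
    calc_num_garbage_alt ((x :: y :: rest).take mid) + calc_num_garbage_alt ((x :: y :: rest).drop mid)
termination_by A.length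
decreasing_by
  · simp; omega
  · simp; omega

-- ===== PRECONDITION & SPEC =====
def Spec_calc_num_garbage (A : List String) (out : Int) : Prop := out = calc_num_garbage_alt A
instance (A : List String) (out : Int) : Decidable (Spec_calc_num_garbage A out) := by unfold Spec_calc_num_garbage; infer_instance

-- ===== CLAIM =====
def Claim_equal_calc_num_garbage : Prop := ∀ (A : List String), Dom_calc_num_garbage A → Spec_calc_num_garbage A (calc_num_garbage A)

-- ===== LEMMAS AND PROOFS =====

theorem calc_fold_eq (A : List String) (acc : Int) :
    A.foldl (fun num_garbage i =>
      if i == "a" then num_garbage + 1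
      else if i == "b" then num_garbage - 1
      else num_garbage) acc
    = acc + (A.count "a" : Int) - (A.count "b" : Int) := by
  induction A generalizing acc with
  | nil => simp
  | cons x xs ih =>
    simp only [List.foldl_cons, List.count_cons, ih]
    by_cases h1 : x = "a" <;> by_cases h2 : x = "b" <;>
      simp [h1, h2] <;> ring

theorem alt_eq_count (A : List String) :
    calc_num_garbage_alt A = (A.count "a" : Int) - (A.count "b" : Int) := by
  fun_induction calc_num_garbage_alt A with
  | case1 => simp
  | case2 x =>
    by_cases h1 : x = "a"
    · subst h1; decide
    by_cases h2 : x = "b"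
    · subst h2; decide
    have ha : ("a" == x) = false := beq_eq_false_iff_ne.mpr (fun h => h1 h.symm)
    have hb : ("b" == x) = false := beq_eq_false_iff_ne.mpr (fun h => h2 h.symm)
    simp [pvScore, PySem.Dict.ofList, PySem.Dict.getD, PySem.Dict.update,
          PySem.Dict.insert, PySem.Dict.empty, PySem.Dict.get?, List.find?, h1, h2, ha, hb]
  | case3 a b rest h ih1 ih2 =>
    dsimp only
    rw [ih1, ih2]
    have hsplit := List.take_append_drop ((a :: b :: rest).length / 2) (a :: b :: rest)
    have hca := congrArg (List.count "a") hsplit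
    have hcb := congrArg (List.count "b") hsplit
    rw [List.count_append] at hca hcb
    push_cast [← hca, ← hcb]
    ring

-- ===== VERDICT =====
theorem calc_num_garbage_spec : Claim_equal_calc_num_garbage := by
  intro A _
  unfold Spec_calc_num_garbage calc_num_garbage
  rw [alt_eq_count, calc_fold_eq A 0]
  ring
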